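-- pv_equiv track=rewrite | github.com/ttteam22/npo_classification | parser.py | link_splitter
-- ===== SOURCE A (Python) =====
-- def link_splitter(url_string):
--     result = []
--     urls = []
--     url_string = url_string.strip()
--     for url in url_string.split(","):
--         urls.append(url)
--
--     for url in urls:
--         for each in url.split("\n"):
--             result.append(each)
--
--     return result
-- ===== SOURCE B (Python) =====
-- def link_splitter(url_string):
--     result = []
--     cur = []
--     for ch in url_string.strip():
--         if ch == ',' or ch == '\n':
--             result.append(''.join(cur))
--             cur = []
--         else:
--             cur.append(ch)
--     result.append(''.join(cur))
--     return result
-- ===== Notes on version B (the rewrite author's own statement) =====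
-- stated objective: alternative
-- what changed: Replaces the two-phase nested splitting (split on commas, then split each piece on newlines, with an intermediate urls list) by a single character-by-character scan that cuts a segment at either delimiter.
import Mathlib
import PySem

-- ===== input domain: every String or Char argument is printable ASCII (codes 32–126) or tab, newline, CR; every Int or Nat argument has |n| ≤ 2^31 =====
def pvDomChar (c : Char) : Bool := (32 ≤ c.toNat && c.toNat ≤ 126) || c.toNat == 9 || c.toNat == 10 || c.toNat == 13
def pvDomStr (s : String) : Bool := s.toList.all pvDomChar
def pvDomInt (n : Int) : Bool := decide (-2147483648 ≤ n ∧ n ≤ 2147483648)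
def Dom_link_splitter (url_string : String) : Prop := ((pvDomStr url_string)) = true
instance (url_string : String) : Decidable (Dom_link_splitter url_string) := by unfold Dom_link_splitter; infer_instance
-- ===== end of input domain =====

-- B replaces the nested comma-then-newline splitting by one character scan cutting segments at either delimiter (alternative decomposition, same cost).


-- ===== PORT A =====
def link_splitter (url_string : String) : List String :=
  let s := PySem.Str.strip url_string
  let urls := ((PySem.Str.split? s ",").getD []).foldl (fun acc url => acc ++ [url]) []
  urls.foldl (fun result url =>
    ((PySem.Str.split? url "\n").getD []).foldl (fun r each => r ++ [each]) result) []

-- ===== PORT B =====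
def link_splitter_alt (url_string : String) : List String :=
  let p := (PySem.Str.strip url_string).toList.foldl
    (fun (st : List String × List Char) ch =>
      if ch = ',' ∨ ch = '\n' then (st.1 ++ [String.ofList st.2], [])
      else (st.1, st.2 ++ [ch])) ([], [])
  p.1 ++ [String.ofList p.2]

-- ===== PRECONDITION & SPEC =====
def Spec_link_splitter (url_string : String) (out : List String) : Prop := out = link_splitter_alt url_string
instance (url_string : String) (out : List String) : Decidable (Spec_link_splitter url_string out) := by unfold Spec_link_splitter; infer_instance

-- ===== CLAIM (what is proved, stated in full; the proofs are below) =====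
def Claim_equal_link_splitter : Prop := ∀ (url_string : String), Dom_link_splitter url_string → Spec_link_splitter url_string (link_splitter url_string)

-- ===== LEMMAS AND PROOFS =====

/-- Apply `f` to the head of a list (if any). -/
def mapHead (f : List Char → List Char) : List (List Char) → List (List Char)
  | [] => []
  | h :: t => f h :: t

/-- Split on a single delimiter character, with an accumulated prefix for the first piece. -/
def splitD1 (d : Char) (pre : List Char) : List Char → List (List Char)
  | [] => [pre]
  | c :: rest => if c = d then pre :: splitD1 d [] rest else splitD1 d (pre ++ [c]) rest

/-- Split on either of the two delimiters. -/
def split2 : List Char → List (List Char)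
  | [] => [[]]
  | c :: rest => if c = ',' ∨ c = '\n' then [] :: split2 rest else mapHead (c :: ·) (split2 rest)

theorem splitD1_ne_nil (d : Char) (pre t : List Char) : splitD1 d pre t ≠ [] := by
  induction t generalizing pre with
  | nil => simp [splitD1]
  | cons c rest ih => by_cases h : c = d <;> simp [splitD1, h, ih]

theorem mapHead_mapHead (f g : List Char → List Char) (l : List (List Char)) :
    mapHead f (mapHead g l) = mapHead (fun x => f (g x)) l := by
  cases l <;> simp [mapHead]

theorem mapHead_id (l : List (List Char)) : mapHead (fun x => x) l = l := by
  cases l <;> simp [mapHead]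

theorem splitD1_acc (d : Char) (pre t : List Char) :
    splitD1 d pre t = mapHead (pre ++ ·) (splitD1 d [] t) := by
  induction t generalizing pre with
  | nil => simp [splitD1, mapHead]
  | cons c rest ih =>
    by_cases h : c = d
    · simp [splitD1, h, mapHead]
    · simp only [splitD1, if_neg h]
      rw [ih (pre ++ [c]), ih ([] ++ [c]), mapHead_mapHead]
      simp [List.append_assoc]

theorem go_single (d : Char) (fuel : Nat) (l cur : List Char) (accs : List (List Char))
    (h : l.length < fuel) :
    PySem.Chars.splitOn.go [d] fuel l cur accs = accs.reverse ++ splitD1 d cur.reverse l := by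
  induction fuel generalizing l cur accs with
  | zero => omega
  | succ fuel ih =>
    cases l with
    | nil => simp [PySem.Chars.splitOn.go, splitD1]
    | cons c rest =>
      simp only [PySem.Chars.splitOn.go]
      by_cases hc : c = d
      · have hp : List.isPrefixOf [d] (c :: rest) = true := by simp [List.isPrefixOf, hc]
        rw [if_pos hp]
        simp only [List.length_cons] at h
        rw [ih _ _ _ (by simp; omega)]
        simp [splitD1, hc]
      · have hp : List.isPrefixOf [d] (c :: rest) = false := by
          simp [List.isPrefixOf]; exact fun hdc => (hc hdc.symm).elim
        rw [if_neg (by simp [hp])]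
        simp only [List.length_cons] at h
        rw [ih _ _ _ (by omega)]
        simp [splitD1, hc]

theorem splitOn_single (d : Char) (t : List Char) :
    PySem.Chars.splitOn t [d] = splitD1 d [] t := by
  unfold PySem.Chars.splitOn
  rw [go_single d (t.length + 1) t [] [] (by omega)]
  simp

theorem splitD1_eq_cons (d c : Char) (rest h : List Char) (tl : List (List Char))
    (hc : ¬ c = d) (hS : splitD1 d [] rest = h :: tl) :
    splitD1 d [] (c :: rest) = (c :: h) :: tl := by
  simp only [splitD1, if_neg hc]
  rw [splitD1_acc, hS]
  simp [mapHead]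

theorem flatMap_splitD1 (t : List Char) :
    (splitD1 ',' [] t).flatMap (fun u => splitD1 '\n' [] u) = split2 t := by
  induction t with
  | nil => simp [splitD1, split2]
  | cons c rest ih =>
    obtain ⟨h, tl, hS⟩ : ∃ h tl, splitD1 ',' [] rest = h :: tl := by
      cases hS : splitD1 ',' [] rest with
      | nil => exact absurd hS (splitD1_ne_nil _ _ _)
      | cons h tl => exact ⟨h, tl, rfl⟩
    obtain ⟨h2, t2, hS2⟩ : ∃ h2 t2, splitD1 '\n' [] h = h2 :: t2 := by
      cases hS2 : splitD1 '\n' [] h with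
      | nil => exact absurd hS2 (splitD1_ne_nil _ _ _)
      | cons h2 t2 => exact ⟨h2, t2, rfl⟩
    by_cases hc : c = ','
    · subst hc
      simp [splitD1, split2, ih]
    · by_cases hn : c = '\n'
      · subst hn
        rw [splitD1_eq_cons _ _ _ _ _ hc hS]
        simp only [List.flatMap_cons]
        have hnl : splitD1 '\n' [] ('\n' :: h) = [] :: splitD1 '\n' [] h := by
          simp [splitD1]
        rw [hnl, split2, if_pos (Or.inr rfl), ← ih, hS]
        simp
      · rw [splitD1_eq_cons _ _ _ _ _ hc hS]
        simp only [List.flatMap_cons]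
        rw [splitD1_eq_cons _ _ _ _ _ hn hS2]
        rw [hS, List.flatMap_cons, hS2] at ih
        simp only [split2, if_neg (not_or.mpr ⟨hc, hn⟩)]
        rw [← ih]
        simp [mapHead]

theorem foldB_eq (t : List Char) (res : List String) (cur : List Char) :
    (let p := t.foldl
        (fun (st : List String × List Char) ch =>
          if ch = ',' ∨ ch = '\n' then (st.1 ++ [String.ofList st.2], [])
          else (st.1, st.2 ++ [ch])) (res, cur)
     p.1 ++ [String.ofList p.2]) =
    res ++ (mapHead (cur ++ ·) (split2 t)).map String.ofList := by
  induction t generalizing res cur with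
  | nil => simp [split2, mapHead]
  | cons c rest ih =>
    by_cases hd : c = ',' ∨ c = '\n'
    · simp only [List.foldl_cons, split2, if_pos hd]
      rw [ih]
      cases hS : split2 rest <;> simp [mapHead]
    · simp only [List.foldl_cons, split2, if_neg hd]
      rw [ih, mapHead_mapHead]
      have : (fun x => cur ++ c :: x) = (fun x => (cur ++ [c]) ++ x) := by
        funext x; simp
      rw [this]

-- ===== VERDICT (by name: the statement is the Claim_ definition above) =====
theorem link_splitter_spec : Claim_equal_link_splitter := by
  intro url_string _
  unfold Spec_link_splitter link_splitter link_splitter_alt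
  have hB := foldB_eq (PySem.Str.strip url_string).toList [] []
  simp only [List.nil_append] at hB
  rw [mapHead_id] at hB
  rw [hB]
  have e1 : "\n".toList = ['\n'] := by decide
  have e2 : ",".toList = [','] := by decide
  simp only [PySem.Str.split?, PySem.Chars.split?, e1, e2, List.isEmpty_cons,
    Option.map_some, Option.getD_some, Bool.false_eq_true,
    if_false, PySem.List.foldl_append_singleton, List.nil_append]
  rw [PySem.List.foldl_append_eq_flatMap]
  simp only [List.nil_append, List.flatMap_map, String.toList_ofList, splitOn_single]
  rw [← List.map_flatMap, flatMap_splitD1]
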